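-- pv_equiv track=rewrite | github.com/daniel-reich/ubiquitous-fiesta | pkw5zmXmQ9qg9LYAi_6.py | space_message
-- ===== SOURCE A (Python) =====
-- def space_message(txt):
--   res = ['']
--   for c in txt:
--     if c == '[':
--       res.append('')
--     elif c == ']':
--       tmp,i = res.pop(),0
--       while tmp[i].isdigit():
--         i += 1
--       res[-1] += tmp[i:]*int(tmp[:i])
--     else:
--       res[-1] += c
--   return res[0]
-- ===== SOURCE B (Python) =====
-- def space_message(txt):
--   s = txt
--   while ']' in s:
--     j = s.index(']')
--     i = s.rindex('[', 0, j)
--     seg = s[i + 1:j]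
--     k = 0
--     while k < len(seg) and seg[k].isdigit():
--       k += 1
--     s = s[:i] + seg[k:] * int(seg[:k]) + s[j + 1:]
--   return s.split('[')[0]
-- ===== Notes on version B (the rewrite author's own statement) =====
-- stated objective: faster
-- what changed: A decodes in one left-to-right pass maintaining an explicit stack of partial buffers, rebuilding the top buffer string on every character; B instead repeatedly rewrites the text itself: find the first ']', take the nearest '[' before it, expand that bracket-free segment (digits + body) in place, repeat until no ']' remains, then return the prefix that precedes any unclosed opening bracket.
-- outside the precondition, e.g. on space_message(']'): A raises IndexError, B raises ValueError
import Mathlib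
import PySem

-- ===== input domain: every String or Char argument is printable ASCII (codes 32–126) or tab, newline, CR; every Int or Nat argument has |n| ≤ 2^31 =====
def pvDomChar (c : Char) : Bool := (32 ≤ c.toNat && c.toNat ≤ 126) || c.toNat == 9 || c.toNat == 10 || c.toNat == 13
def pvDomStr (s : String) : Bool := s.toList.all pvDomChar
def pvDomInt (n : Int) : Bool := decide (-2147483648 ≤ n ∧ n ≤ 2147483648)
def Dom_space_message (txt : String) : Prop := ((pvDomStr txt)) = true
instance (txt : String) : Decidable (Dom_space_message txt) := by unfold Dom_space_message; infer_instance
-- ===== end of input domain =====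

-- B re-implements the decoder by repeated innermost textual rewriting (find first ']', expand the
-- bracket it closes, splice, repeat) instead of A's single pass with an explicit stack of buffers;
-- objective: faster (A rebuilds the top-of-stack string on every character; B splices once per bracket).

-- ===== PORT A =====

-- int(<digit string>) for a nonempty all-digit list (both Pythons only call int on such strings)
def digitsVal (l : List Char) : Nat := l.foldl (fun a c => a * 10 + (c.toNat - 48)) 0

-- A's ']' branch applied to the popped buffer tmp: the `while tmp[i].isdigit()` scan,
-- then tmp[i:]*int(tmp[:i]).  none = Python raised (IndexError when the scan runs off the
-- end, ValueError from int('') when there is no leading digit).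
def popDecode? (tmp : List Char) : Option (List Char) :=
  let i := (tmp.takeWhile Char.isDigit).length
  if i = tmp.length then none
  else if i = 0 then none
  else some (List.flatten (List.replicate (digitsVal (tmp.take i)) (tmp.drop i)))

-- one iteration of A's for-loop body; res[-1] is the last element, res.append pushes at the end.
-- none = the Python body raised (pop/res[-1] on an empty list, or popDecode? failed).
def stepA (res : List (List Char)) (c : Char) : Option (List (List Char)) :=
  if c = '[' then some (res ++ [[]])
  else if c = ']' then
    match res.getLast? with
    | none => none
    | some tmp =>
      match res.dropLast.getLast? with
      | none => none
      | some b => (popDecode? tmp).map (fun e => res.dropLast.dropLast ++ [b ++ e])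
  else
    match res.getLast? with
    | none => none
    | some b => some (res.dropLast ++ [b ++ [c]])

def runA (res : List (List Char)) : List Char → Option (List (List Char))
  | [] => some res
  | c :: s => (stepA res c).bind (fun r => runA r s)

def space_message (txt : String) : String :=
  match runA [[]] txt.toList with
  | none => ""                                 -- the Python raised here: outside Pre_
  | some res => String.ofList (res.head?.getD [])  -- return res[0] (res is never empty on success)

-- ===== PORT B =====

-- one iteration of B's while-loop body: j = s.index(']'), i = s.rindex('[', 0, j),
-- decode the bracket-free segment between them and splice.  none = Python raised
-- (ValueError from rindex when no '[' precedes j, or from int('')).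
def stepB (s : List Char) : Option (List Char) :=
  let j := (s.takeWhile (· ≠ ']')).length
  let pre := s.take j
  if '[' ∈ pre then
    let i := j - 1 - (pre.reverse.takeWhile (· ≠ '[')).length
    let seg := (s.drop (i + 1)).take (j - i - 1)
    let k := (seg.takeWhile Char.isDigit).length
    if k = 0 then none
    else some (s.take i ++ List.flatten (List.replicate (digitsVal (seg.take k)) (seg.drop k)) ++ s.drop (j + 1))
  else none

-- B's while loop.  Each iteration removes exactly one ']' (the splice is ']'-free), so the
-- initial count of ']' is always enough fuel; fuel exhaustion is unreachable.
def loopB : Nat → List Char → Option (List Char)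
  | 0, s => if ']' ∈ s then none else some s
  | f + 1, s => if ']' ∈ s then (stepB s).bind (loopB f) else some s

def space_message_alt (txt : String) : String :=
  match loopB (txt.toList.count ']') txt.toList with
  | none => ""                                          -- the Python raised here: outside Pre_
  | some s => String.ofList (s.takeWhile (· ≠ '['))         -- s.split('[')[0]

-- ===== PRECONDITION & SPEC =====

-- Pre_ is the exact well-formedness condition of the encoding: it holds precisely on the inputs
-- where the Python A returns (it raises on a ']' closing no bracket and on a closed bracket whose
-- decoded content is empty, all digits, or does not start with a digit).  It is checked by a
-- single left-to-right scan keeping one three-valued state per currently open bracket — whether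
-- its content so far is a (possibly empty) digit run, already "digits then body" (and whether the
-- digit run contains a nonzero digit), or irrecoverably malformed — no decoding is performed.
inductive St
  | run : Bool → Bool → St      -- content so far is all digits: (seen ≥ 1 digit, seen a nonzero digit)
  | done : Bool → St            -- content is digits then a body starting with a non-digit (arg: nonzero digit run)
  | dead : St                   -- content starts with a non-digit: this bracket may never be closed
deriving DecidableEq, Repr

-- effect on a bracket's state of appending something that starts with a non-digit
def ndStep : St → St
  | .run rp nz => if rp then .done nz else .dead
  | μ => μ

-- effect of one literal character on a bracket's state
def charStep (μ : St) (c : Char) : St :=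
  match μ with
  | .run rp nz => if c.isDigit then .run true (nz || decide (c ≠ '0')) else ndStep (.run rp nz)
  | μ => μ

-- one character of the well-formedness scan; the stack (top first) holds the open brackets'
-- states (the top level is unconstrained); none = A has already raised
def vStep (q : Option (List St)) (c : Char) : Option (List St) :=
  match q with
  | none => none
  | some σ =>
    if c = '[' then some (.run false false :: σ)
    else if c = ']' then
      match σ with
      | [] => none                      -- ']' closing no bracket: A raises
      | .done nz :: σ' =>               -- well-formed bracket; a nonzero one appends a non-digit-led body to its parent
        some (if nz then (match σ' with | [] => [] | p :: t => ndStep p :: t) else σ')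
      | _ :: _ => none                  -- empty / all-digit / non-digit-led content: A raises
    else
      match σ with
      | [] => some []
      | μ :: σ' => some (charStep μ c :: σ')

def validEnc (s : List Char) : Bool := (s.foldl vStep (some [])).isSome

def Pre_space_message (txt : String) : Prop := validEnc txt.toList = true

instance (txt : String) : Decidable (Pre_space_message txt) := by
  unfold Pre_space_message; infer_instance

def pvWitness_space_message : String := "[3[2ab]c]"

def Spec_space_message (txt : String) (out : String) : Prop := out = space_message_alt txt
instance (txt : String) (out : String) : Decidable (Spec_space_message txt out) := by unfold Spec_space_message; infer_instance

-- ===== CLAIM (what is proved, stated in full; the proofs are below) =====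
def Claim_equal_space_message : Prop := ∀ (txt : String), Dom_space_message txt → Pre_space_message txt → Spec_space_message txt (space_message txt)

-- ===== LEMMAS AND PROOFS =====

-- ---------- A-side: runA on bracket-free / ']' -free text ----------

-- the stack growth of A over ']'-free text, relative to the current top buffer
def grow (b : List Char) : List Char → List (List Char)
  | [] => [b]
  | c :: s => if c = '[' then b :: grow [] s else grow (b ++ [c]) s

theorem grow_ne_nil (s : List Char) (b : List Char) : grow b s ≠ [] := by
  induction s generalizing b with
  | nil => simp [grow]
  | cons c s ih =>
    simp only [grow]
    split <;> simp [ih]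

theorem grow_head (s : List Char) (b : List Char) :
    (grow b s).head? = some (b ++ s.takeWhile (· ≠ '[')) := by
  induction s generalizing b with
  | nil => simp [grow]
  | cons c s ih =>
    by_cases hc : c = '['
    · subst hc; simp [grow, List.takeWhile]
    · simp [grow, hc, ih, List.takeWhile]

theorem runA_append (u v : List Char) (σ : List (List Char)) :
    runA σ (u ++ v) = (runA σ u).bind (fun τ => runA τ v) := by
  induction u generalizing σ with
  | nil => simp [runA]
  | cons c u ih =>
    simp only [List.cons_append, runA]
    cases stepA σ c with
    | none => simp
    | some τ => simp [ih]

theorem runA_no_close (s : List Char) (σ₀ : List (List Char)) (b : List Char)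
    (h : ']' ∉ s) : runA (σ₀ ++ [b]) s = some (σ₀ ++ grow b s) := by
  induction s generalizing σ₀ b with
  | nil => simp [runA, grow]
  | cons c s ih =>
    have hc2 : c ≠ ']' := by intro h'; exact h (h' ▸ List.mem_cons_self)
    have hs : ']' ∉ s := fun h' => h (List.mem_cons_of_mem _ h')
    by_cases hc : c = '['
    · subst hc
      simp only [runA, stepA, reduceIte]
      have := ih (σ₀ := σ₀ ++ [b]) (b := []) hs
      simp only [List.append_assoc] at this ⊢
      simpa [grow] using this
    · simp only [runA, stepA, if_neg hc, if_neg hc2, List.getLast?_concat,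
        List.dropLast_concat, Option.bind_some]
      have := ih (σ₀ := σ₀) (b := b ++ [c]) hs
      simpa [grow, hc] using this

theorem runA_no_brackets (e : List Char) (σ₀ : List (List Char)) (b : List Char)
    (h1 : ']' ∉ e) (h2 : '[' ∉ e) : runA (σ₀ ++ [b]) e = some (σ₀ ++ [b ++ e]) := by
  have hg : grow b e = [b ++ e] := by
    clear h1
    induction e generalizing b with
    | nil => simp [grow]
    | cons c s ih =>
      have hc : c ≠ '[' := by intro h'; exact h2 (h' ▸ List.mem_cons_self)
      have hs : '[' ∉ s := fun h' => h2 (List.mem_cons_of_mem _ h')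
      simp [grow, hc, ih _ hs]
  rw [runA_no_close e σ₀ b h1, hg]

theorem loopB_no_close (f : Nat) (s : List Char) (h : ']' ∉ s) : loopB f s = some s := by
  cases f <;> simp [loopB, h]

-- both versions on ']'-free input
theorem base_case (s : List Char) (h : ']' ∉ s) (f : Nat) :
    (match runA [[]] s with
     | none => ""
     | some res => String.ofList (res.head?.getD [])) =
    (match loopB f s with
     | none => ""
     | some t => String.ofList (t.takeWhile (· ≠ '['))) := by
  have h1 : runA [[]] s = some ([] ++ grow [] s) := runA_no_close s [] [] h
  rw [h1, loopB_no_close f s h]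
  simp [grow_head]

-- ---------- the innermost-bracket reduction, on both sides ----------

theorem takeWhile_front (p : Char → Bool) (D : List Char) (c : Char) (r : List Char)
    (hD : ∀ a ∈ D, p a) (hc : p c = false) : (D ++ c :: r).takeWhile p = D := by
  induction D with
  | nil => simp [List.takeWhile, hc]
  | cons a D ih =>
    have ha : p a := hD a List.mem_cons_self
    simp [List.takeWhile, ha, ih (fun x hx => hD x (List.mem_cons_of_mem _ hx))]

theorem popDecode_eq (D : List Char) (c : Char) (r : List Char)
    (hDne : D ≠ []) (hD : ∀ a ∈ D, a.isDigit) (hc : c.isDigit = false) :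
    popDecode? (D ++ c :: r) = some (List.flatten (List.replicate (digitsVal D) (c :: r))) := by
  have htw : ((D ++ c :: r).takeWhile Char.isDigit) = D := takeWhile_front _ D c r hD hc
  have hlen : D.length ≠ (D ++ c :: r).length := by simp
  have hlen0 : D.length ≠ 0 := fun h => hDne (List.eq_nil_of_length_eq_zero h)
  simp only [popDecode?, htw, if_neg hlen, if_neg hlen0]
  try rw [List.take_left]
  try rw [List.drop_left]

theorem stepA_close (σ₀ : List (List Char)) (tb tmp : List Char) :
    stepA (σ₀ ++ [tb] ++ [tmp]) ']' =
      (popDecode? tmp).map (fun e => σ₀ ++ [tb ++ e]) := by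
  simp [stepA, List.getLast?_concat]

-- A-side: expanding the innermost bracket does not change the run
theorem runA_reduce (x seg y e : List Char) (σ : List (List Char))
    (hσ : σ ≠ []) (hx : ']' ∉ x) (hs1 : '[' ∉ seg) (hs2 : ']' ∉ seg)
    (he1 : '[' ∉ e) (he2 : ']' ∉ e)
    (hdec : popDecode? seg = some e) :
    runA σ (x ++ '[' :: (seg ++ ']' :: y)) = runA σ (x ++ (e ++ y)) := by
  obtain ⟨σ₀, b, hcb⟩ := List.eq_nil_or_concat σ |>.resolve_left hσ
  simp only [List.concat_eq_append] at hcb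
  subst hcb
  rw [runA_append, runA_append, runA_no_close x σ₀ b hx]
  set τ := σ₀ ++ grow b x with hτ
  obtain ⟨τ₀, tb, hτ2⟩ := List.eq_nil_or_concat τ |>.resolve_left
    (by simp [hτ, grow_ne_nil])
  simp only [List.concat_eq_append] at hτ2
  simp only [Option.bind_some]
  have lhs1 : runA τ ('[' :: (seg ++ ']' :: y)) = runA (τ ++ [[]]) (seg ++ ']' :: y) := by
    simp [runA, stepA]
  have lhs2 : runA (τ ++ [[]]) (seg ++ ']' :: y) =
      (runA (τ ++ [[]]) seg).bind (fun τ' => runA τ' (']' :: y)) := runA_append ..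
  have lhs3 : runA (τ ++ [[]]) seg = some (τ ++ [[] ++ seg]) :=
    runA_no_brackets seg τ [] hs2 hs1
  have lhs4 : runA (τ ++ [seg]) (']' :: y) = (stepA (τ ++ [seg]) ']').bind (fun r => runA r y) := by
    simp [runA]
  have lhs5 : stepA (τ ++ [seg]) ']' = some (τ₀ ++ [tb ++ e]) := by
    rw [hτ2, stepA_close, hdec]; rfl
  have rhs : runA τ (e ++ y) = (runA τ e).bind (fun τ' => runA τ' y) := runA_append ..
  have rhs2 : runA τ e = some (τ₀ ++ [tb ++ e]) := by
    rw [hτ2]; exact runA_no_brackets e τ₀ tb he2 he1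
  rw [lhs1, lhs2, lhs3]
  simp only [List.nil_append, Option.bind_some]
  rw [lhs4, lhs5, rhs, rhs2]

-- B-side: one loop iteration performs exactly this reduction
theorem stepB_eq (x seg y : List Char) (D : List Char) (c : Char) (r : List Char)
    (hx : ']' ∉ x) (hs1 : '[' ∉ seg) (hs2 : ']' ∉ seg)
    (hseg : seg = D ++ c :: r) (hDne : D ≠ []) (hD : ∀ a ∈ D, a.isDigit)
    (hc : c.isDigit = false) :
    stepB (x ++ '[' :: (seg ++ ']' :: y)) =
      some (x ++ (List.flatten (List.replicate (digitsVal D) (c :: r)) ++ y)) := by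
  have hj : ((x ++ '[' :: (seg ++ ']' :: y)).takeWhile (· ≠ ']')) = x ++ '[' :: seg := by
    have : x ++ '[' :: (seg ++ ']' :: y) = (x ++ '[' :: seg) ++ ']' :: y := by simp
    rw [this, takeWhile_front (· ≠ ']') (x ++ '[' :: seg) ']' y ?_ (by simp)]
    intro a ha; simp only [decide_eq_true_eq, ne_eq]
    rcases List.mem_append.1 ha with h | h
    · exact fun h' => hx (h' ▸ h)
    · rcases List.mem_cons.1 h with h' | h'
      · simp [h']
      · exact fun h'' => hs2 (h'' ▸ h')
  have hsplit : x ++ '[' :: (seg ++ ']' :: y) = (x ++ '[' :: seg) ++ ']' :: y := by simp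
  have hpre : (x ++ '[' :: (seg ++ ']' :: y)).take (x ++ '[' :: seg).length = x ++ '[' :: seg := by
    rw [hsplit, List.take_left]
  have hmem : '[' ∈ x ++ '[' :: seg := by simp
  have hrev : ((x ++ '[' :: seg).reverse.takeWhile (· ≠ '[')) = seg.reverse := by
    rw [show (x ++ '[' :: seg).reverse = seg.reverse ++ '[' :: x.reverse by simp]
    refine takeWhile_front _ _ _ _ ?_ (by simp)
    intro a ha
    simp only [decide_eq_true_eq, ne_eq]
    exact fun h' => hs1 (h' ▸ List.mem_reverse.1 ha)
  have hi : (x ++ '[' :: seg).length - 1 - seg.reverse.length = x.length := by simp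
  have hdropx : (x ++ '[' :: (seg ++ ']' :: y)).drop (x.length + 1) = seg ++ ']' :: y := by
    rw [show x ++ '[' :: (seg ++ ']' :: y) = (x ++ ['[']) ++ (seg ++ ']' :: y) by simp]
    rw [show x.length + 1 = (x ++ ['[']).length by simp, List.drop_left]
  have harith : (x ++ '[' :: seg).length - x.length - 1 = seg.length := by simp
  have htakeseg : (seg ++ ']' :: y).take seg.length = seg := List.take_left ..
  have hkD : (seg.takeWhile Char.isDigit) = D := hseg ▸ takeWhile_front _ D c r hD hc
  have hk0 : D.length ≠ 0 := fun h => hDne (List.eq_nil_of_length_eq_zero h)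
  have htakeD : seg.take D.length = D := by rw [hseg]; exact List.take_left ..
  have hdropD : seg.drop D.length = c :: r := by rw [hseg]; exact List.drop_left ..
  have htakex : (x ++ '[' :: (seg ++ ']' :: y)).take x.length = x := List.take_left ..
  have hdropy : (x ++ '[' :: (seg ++ ']' :: y)).drop ((x ++ '[' :: seg).length + 1) = y := by
    rw [show x ++ '[' :: (seg ++ ']' :: y) = ((x ++ '[' :: seg) ++ [']']) ++ y by simp]
    rw [show (x ++ '[' :: seg).length + 1 = ((x ++ '[' :: seg) ++ [']']).length by
      simp only [List.length_append, List.length_cons, List.length_nil]; try omega]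
    exact List.drop_left ..
  simp only [stepB, hj, hpre, if_pos hmem, hrev, hi, harith, hdropx, htakeseg, hkD,
    if_neg hk0, htakeD, hdropD, htakex, hdropy, List.append_assoc]

-- ---------- extracting the innermost bracket from validity ----------

theorem exists_first_close (s : List Char) (h : ']' ∈ s) :
    ∃ x y, s = x ++ ']' :: y ∧ ']' ∉ x := by
  induction s with
  | nil => cases h
  | cons a s ih =>
    by_cases ha : a = ']'
    · exact ⟨[], s, by simp [ha], by simp⟩
    · have hs : ']' ∈ s := by rcases List.mem_cons.1 h with h' | h' <;> [exact absurd h'.symm ha; exact h']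
      obtain ⟨x, y, rfl, hx⟩ := ih hs
      refine ⟨a :: x, y, by simp, ?_⟩
      intro hm
      rcases List.mem_cons.1 hm with h' | h'
      · exact ha h'.symm
      · exact hx h'

theorem exists_last_open (x : List Char) (h : '[' ∈ x) :
    ∃ x0 seg, x = x0 ++ '[' :: seg ∧ '[' ∉ seg := by
  induction x with
  | nil => cases h
  | cons a s ih =>
    by_cases hs : '[' ∈ s
    · obtain ⟨x0, seg, rfl, hseg⟩ := ih hs
      exact ⟨a :: x0, seg, by simp, hseg⟩
    · have ha : a = '[' := by rcases List.mem_cons.1 h with h' | h' <;> [exact h'.symm; exact absurd h' hs]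
      exact ⟨[], s, by simp [ha], hs⟩

theorem mem_flatten_replicate (n : Nat) (l : List Char) (a : Char)
    (h : a ∈ List.flatten (List.replicate n l)) : a ∈ l := by
  obtain ⟨l', hl', ha⟩ := List.mem_flatten.1 h
  rwa [List.eq_of_mem_replicate hl'] at ha

theorem flatten_replicate_head (n : Nat) (hn : 0 < n) (c : Char) (r : List Char) :
    ∃ t, List.flatten (List.replicate n (c :: r)) = c :: t := by
  obtain ⟨k, rfl⟩ := Nat.exists_eq_succ_of_ne_zero (Nat.pos_iff_ne_zero.1 hn)
  exact ⟨r ++ List.flatten (List.replicate k (c :: r)), by simp [List.replicate_succ]⟩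

-- digit-run value is positive when the run contains a nonzero digit
theorem digitsVal_aux (l : List Char) (a : Nat)
    (h : 0 < a ∨ ∃ ch ∈ l, ch.isDigit ∧ ch ≠ '0') :
    0 < l.foldl (fun a c => a * 10 + (c.toNat - 48)) a := by
  induction l generalizing a with
  | nil =>
    rcases h with h | ⟨ch, hm, _⟩
    · exact h
    · cases hm
  | cons b l ih =>
    simp only [List.foldl_cons]
    apply ih
    rcases h with h | ⟨ch, hm, hch⟩
    · left; omega
    · rcases List.mem_cons.1 hm with rfl | hm'
      · left
        have h48 : 48 ≤ ch.toNat ∧ ch.toNat ≤ 57 := by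
          have := hch.1
          simp [Char.isDigit] at this
          exact ⟨UInt32.le_iff_toNat_le.1 this.1, UInt32.le_iff_toNat_le.1 this.2⟩
        have hne : ch.toNat ≠ 48 := by
          intro h0
          apply hch.2
          apply Char.ext
          apply UInt32.toNat_inj.1
          exact h0
        omega
      · exact Or.inr ⟨ch, hm', hch⟩

theorem digitsVal_pos (D : List Char) (hD : ∀ a ∈ D, a.isDigit)
    (h : D.any (fun a => decide (a ≠ '0')) = true) : 0 < digitsVal D := by
  obtain ⟨a, ha, hne⟩ := List.any_eq_true.1 h
  exact digitsVal_aux D 0 (Or.inr ⟨a, ha, hD a ha, by simpa using hne⟩)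

theorem digitsVal_zeros (D : List Char) (h : ∀ a ∈ D, a = '0') : digitsVal D = 0 := by
  induction D with
  | nil => rfl
  | cons a D ih =>
    have ha : a = '0' := h a List.mem_cons_self
    subst ha
    have : digitsVal ('0' :: D) = digitsVal D := by
      simp [digitsVal, List.foldl_cons]
    rw [this]
    exact ih (fun x hx => h x (List.mem_cons_of_mem _ hx))

-- ---------- the well-formedness automaton: basic lemmas ----------

theorem foldSt_done (l : List Char) (k : Bool) : l.foldl charStep (.done k) = .done k := by
  induction l with
  | nil => rfl
  | cons a l ih => simpa [charStep] using ih

theorem foldSt_dead (l : List Char) : l.foldl charStep .dead = .dead := by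
  induction l with
  | nil => rfl
  | cons a l ih => simpa [charStep] using ih

theorem foldSt_ndStep (l : List Char) (p : St) : l.foldl charStep (ndStep p) = ndStep p := by
  cases p with
  | run rp nz =>
    simp only [ndStep]
    split
    · exact foldSt_done l nz
    · exact foldSt_dead l
  | done k => exact foldSt_done l k
  | dead => exact foldSt_dead l

theorem charStep_nondigit (p : St) (c : Char) (hc : c.isDigit = false) :
    charStep p c = ndStep p := by
  cases p <;> simp [charStep, ndStep, hc]

theorem charStep_digit (rp nz : Bool) (c : Char) (h : c.isDigit = true) :
    charStep (.run rp nz) c = .run true (nz || decide (c ≠ '0')) := by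
  simp [charStep, h]

theorem charStep_nd_true (nz : Bool) (c : Char) (h : c.isDigit = false) :
    charStep (.run true nz) c = .done nz := by
  simp [charStep, ndStep, h]

theorem charStep_nd_false (nz : Bool) (c : Char) (h : c.isDigit = false) :
    charStep (.run false nz) c = .dead := by
  simp [charStep, ndStep, h]

theorem vStep_close_done (nz : Bool) (σ : List St) :
    vStep (some (.done nz :: σ)) ']' =
      some (if nz then (match σ with | [] => [] | p :: t => ndStep p :: t) else σ) := by
  simp [vStep]

theorem vStep_close_run (rp nz : Bool) (σ : List St) :
    vStep (some (.run rp nz :: σ)) ']' = none := by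
  simp [vStep]

theorem vStep_close_dead (σ : List St) :
    vStep (some (.dead :: σ)) ']' = none := by
  simp [vStep]

theorem fold_vStep_none (l : List Char) : l.foldl vStep none = none := by
  induction l with
  | nil => rfl
  | cons a l ih => simpa [vStep] using ih

theorem fold_chars_nil (l : List Char) (h1 : '[' ∉ l) (h2 : ']' ∉ l) :
    l.foldl vStep (some []) = some [] := by
  induction l with
  | nil => rfl
  | cons a l ih =>
    have ha1 : a ≠ '[' := fun h => h1 (h ▸ List.mem_cons_self)
    have ha2 : a ≠ ']' := fun h => h2 (h ▸ List.mem_cons_self)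
    simp only [List.foldl_cons, vStep, if_neg ha1, if_neg ha2]
    exact ih (fun h => h1 (List.mem_cons_of_mem _ h)) (fun h => h2 (List.mem_cons_of_mem _ h))

theorem fold_chars_cons (l : List Char) (μ : St) (σ : List St)
    (h1 : '[' ∉ l) (h2 : ']' ∉ l) :
    l.foldl vStep (some (μ :: σ)) = some (l.foldl charStep μ :: σ) := by
  induction l generalizing μ with
  | nil => rfl
  | cons a l ih =>
    have ha1 : a ≠ '[' := fun h => h1 (h ▸ List.mem_cons_self)
    have ha2 : a ≠ ']' := fun h => h2 (h ▸ List.mem_cons_self)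
    simp only [List.foldl_cons, vStep, if_neg ha1, if_neg ha2]
    exact ih (charStep μ a) (fun h => h1 (List.mem_cons_of_mem _ h))
      (fun h => h2 (List.mem_cons_of_mem _ h))

theorem fold_digits (D : List Char) (nz0 : Bool) (hD : ∀ a ∈ D, a.isDigit) :
    D.foldl charStep (.run true nz0) = .run true (nz0 || D.any (fun a => decide (a ≠ '0'))) := by
  induction D generalizing nz0 with
  | nil => simp
  | cons a D ih =>
    have ha : a.isDigit := hD a List.mem_cons_self
    simp only [List.foldl_cons, charStep, if_pos ha]
    rw [ih _ (fun x hx => hD x (List.mem_cons_of_mem _ hx))]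
    simp [Bool.or_assoc]

theorem seg_fold (D : List Char) (c : Char) (r : List Char)
    (hDne : D ≠ []) (hD : ∀ a ∈ D, a.isDigit) (hc : c.isDigit = false) :
    (D ++ c :: r).foldl charStep (.run false false) =
      .done (D.any (fun a => decide (a ≠ '0'))) := by
  obtain ⟨d, D', rfl⟩ := List.exists_cons_of_ne_nil hDne
  have hd : d.isDigit = true := hD d List.mem_cons_self
  rw [List.cons_append, List.foldl_cons, charStep_digit _ _ _ hd, List.foldl_append,
    fold_digits D' _ (fun x hx => hD x (List.mem_cons_of_mem _ hx)), List.foldl_cons,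
    charStep_nd_true _ _ hc, foldSt_done]
  simp [List.any_cons, Bool.or_assoc]

theorem run_done (l : List Char) : ∀ (nz0 nz : Bool),
    l.foldl charStep (.run true nz0) = .done nz →
    ∃ D c r, l = D ++ c :: r ∧ (∀ a ∈ D, a.isDigit) ∧ c.isDigit = false ∧
      nz = (nz0 || D.any (fun a => decide (a ≠ '0'))) := by
  induction l with
  | nil => intro nz0 nz h; simp at h
  | cons a l ih =>
    intro nz0 nz h
    by_cases ha : a.isDigit = true
    · rw [List.foldl_cons, charStep_digit _ _ _ ha] at h
      obtain ⟨D, c, r, rfl, hD, hc, hnz⟩ := ih _ _ h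
      refine ⟨a :: D, c, r, by simp, ?_, hc, ?_⟩
      · intro x hx
        rcases List.mem_cons.1 hx with rfl | hx'
        · exact ha
        · exact hD x hx'
      · simp only [List.any_cons] at *
        rw [hnz, Bool.or_assoc]
    · have ha' : a.isDigit = false := by simpa using ha
      rw [List.foldl_cons, charStep_nd_true _ _ ha', foldSt_done] at h
      refine ⟨[], a, l, by simp, by simp, ha', ?_⟩
      simp [St.done.injEq] at h
      simp [h]

theorem start_done (l : List Char) (nz : Bool)
    (h : l.foldl charStep (.run false false) = .done nz) :
    ∃ D c r, l = D ++ c :: r ∧ D ≠ [] ∧ (∀ a ∈ D, a.isDigit) ∧ c.isDigit = false ∧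
      nz = D.any (fun a => decide (a ≠ '0')) := by
  cases l with
  | nil => simp at h
  | cons a l =>
    by_cases ha : a.isDigit = true
    · rw [List.foldl_cons, charStep_digit _ _ _ ha] at h
      obtain ⟨D, c, r, rfl, hD, hc, hnz⟩ := run_done l _ _ h
      refine ⟨a :: D, c, r, by simp, by simp, ?_, hc, ?_⟩
      · intro x hx
        rcases List.mem_cons.1 hx with rfl | hx'
        · exact ha
        · exact hD x hx'
      · simpa using hnz
    · have ha' : a.isDigit = false := by simpa using ha
      rw [List.foldl_cons, charStep_nd_false _ _ ha', foldSt_dead] at h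
      exact absurd h (by simp)

-- a well-formed innermost bracket and its expansion drive the scan identically
theorem group_eq (D : List Char) (c : Char) (r : List Char)
    (hDne : D ≠ []) (hD : ∀ a ∈ D, a.isDigit) (hc : c.isDigit = false)
    (hs1 : '[' ∉ (D ++ c :: r)) (hs2 : ']' ∉ (D ++ c :: r)) (q : Option (List St)) :
    ('[' :: ((D ++ c :: r) ++ [']'])).foldl vStep q =
      (List.flatten (List.replicate (digitsVal D) (c :: r))).foldl vStep q := by
  cases q with
  | none => rw [fold_vStep_none, fold_vStep_none]
  | some σ =>
    set e := List.flatten (List.replicate (digitsVal D) (c :: r)) with he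
    have he1 : '[' ∉ e := fun h => hs1 (by
      have := mem_flatten_replicate _ _ _ h
      rcases List.mem_cons.1 this with h' | h'
      · exact h' ▸ List.mem_append.2 (Or.inr List.mem_cons_self)
      · exact List.mem_append.2 (Or.inr (List.mem_cons_of_mem _ h')))
    have he2 : ']' ∉ e := fun h => hs2 (by
      have := mem_flatten_replicate _ _ _ h
      rcases List.mem_cons.1 this with h' | h'
      · exact h' ▸ List.mem_append.2 (Or.inr List.mem_cons_self)
      · exact List.mem_append.2 (Or.inr (List.mem_cons_of_mem _ h')))
    have lhs1 : ('[' :: ((D ++ c :: r) ++ [']'])).foldl vStep (some σ) =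
        ([']'] : List Char).foldl vStep ((D ++ c :: r).foldl vStep (some (.run false false :: σ))) := by
      simp [List.foldl_cons, List.foldl_append, vStep]
    have hln1 : '[' ∉ D ++ c :: r := hs1
    have hln2 : ']' ∉ D ++ c :: r := hs2
    rw [lhs1, fold_chars_cons _ _ _ hln1 hln2, seg_fold D c r hDne hD hc,
      List.foldl_cons, List.foldl_nil, vStep_close_done]
    cases hnz : D.any (fun a => decide (a ≠ '0')) with
    | false =>
      have hzero : digitsVal D = 0 := by
        apply digitsVal_zeros
        intro a ha
        have := (List.any_eq_false.1 hnz) a ha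
        simpa using this
      have hee : e = [] := by rw [he, hzero]; simp
      rw [hee]
      simp
    | true =>
      have hpos : 0 < digitsVal D := digitsVal_pos D hD hnz
      obtain ⟨t, het⟩ := flatten_replicate_head _ hpos c r
      rw [← he] at het
      cases σ with
      | nil =>
        rw [fold_chars_nil e he1 he2]
        simp
      | cons p t' =>
        rw [fold_chars_cons e p t' he1 he2, het, List.foldl_cons,
          charStep_nondigit p c hc, foldSt_ndStep]
        simp

-- replacing the innermost bracket by its expansion preserves well-formedness exactly
theorem valid_reduct (x seg y D : List Char) (c : Char) (r : List Char)
    (hseg : seg = D ++ c :: r) (hDne : D ≠ []) (hD : ∀ a ∈ D, a.isDigit)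
    (hc : c.isDigit = false) (hs1 : '[' ∉ seg) (hs2 : ']' ∉ seg) :
    validEnc (x ++ '[' :: (seg ++ ']' :: y)) =
      validEnc (x ++ (List.flatten (List.replicate (digitsVal D) (c :: r)) ++ y)) := by
  subst hseg
  have h1 : x ++ '[' :: ((D ++ c :: r) ++ ']' :: y) =
      (x ++ ('[' :: ((D ++ c :: r) ++ [']']))) ++ y := by simp
  have h2 : x ++ (List.flatten (List.replicate (digitsVal D) (c :: r)) ++ y) =
      (x ++ List.flatten (List.replicate (digitsVal D) (c :: r))) ++ y := by simp
  rw [show ('[' :: ((D ++ c :: r) ++ ']' :: y)) = ('[' :: ((D ++ c :: r) ++ [']'])) ++ y by simp] at h1 ⊢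
  unfold validEnc
  rw [h1, h2, List.foldl_append, List.foldl_append, List.foldl_append, List.foldl_append,
    group_eq D c r hDne hD hc hs1 hs2]

-- a well-formed string containing ']' decomposes around its innermost bracket
theorem extract (s : List Char) (hv : validEnc s = true) (hm : ']' ∈ s) :
    ∃ (x seg y D : List Char) (c : Char) (r : List Char),
      s = x ++ '[' :: (seg ++ ']' :: y) ∧ ']' ∉ x ∧ '[' ∉ seg ∧
      ']' ∉ seg ∧ seg = D ++ c :: r ∧ D ≠ [] ∧ (∀ a ∈ D, a.isDigit) ∧
      c.isDigit = false := by
  obtain ⟨x', y0, rfl, hx'⟩ := exists_first_close s hm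
  have hopenx : '[' ∈ x' := by
    by_contra hno
    have h1 : (x' ++ ']' :: y0).foldl vStep (some []) =
        y0.foldl vStep (vStep (x'.foldl vStep (some [])) ']') := by
      rw [List.foldl_append, List.foldl_cons]
    rw [fold_chars_nil x' hno hx'] at h1
    have : vStep (some ([] : List St)) ']' = none := by simp [vStep]
    rw [this, fold_vStep_none] at h1
    rw [validEnc, h1] at hv
    simp at hv
  obtain ⟨x0, seg, rfl, hseg1⟩ := exists_last_open x' hopenx
  have hx0 : ']' ∉ x0 := fun h => hx' (List.mem_append.2 (Or.inl h))
  have hseg2 : ']' ∉ seg := fun h => hx' (by simp [h])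
  have hshape : (x0 ++ '[' :: seg) ++ ']' :: y0 = x0 ++ '[' :: (seg ++ ']' :: y0) := by simp
  have hfold : ((x0 ++ '[' :: seg) ++ ']' :: y0).foldl vStep (some []) =
      y0.foldl vStep (vStep (seg.foldl vStep (vStep (x0.foldl vStep (some [])) '[')) ']') := by
    rw [List.foldl_append, List.foldl_append, List.foldl_cons, List.foldl_cons]
  cases hq0 : x0.foldl vStep (some []) with
  | none =>
    exfalso
    rw [validEnc, hfold, hq0] at hv
    simp only [vStep] at hv
    rw [fold_vStep_none, fold_vStep_none] at hv
    simp at hv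
  | some σ0 =>
    have hpush : vStep (some σ0) '[' = some (.run false false :: σ0) := by simp [vStep]
    have hsegf : seg.foldl vStep (some (.run false false :: σ0)) =
        some (seg.foldl charStep (.run false false) :: σ0) :=
      fold_chars_cons seg _ σ0 hseg1 hseg2
    cases hμ : seg.foldl charStep (.run false false) with
    | done nz =>
      obtain ⟨D, c, r, hsegeq, hDne, hD, hc, _⟩ := start_done seg nz hμ
      exact ⟨x0, seg, y0, D, c, r, hshape, hx0, hseg1, hseg2, hsegeq, hDne, hD, hc⟩
    | run rp nz =>
      exfalso
      rw [validEnc, hfold, hq0, hpush, hsegf, hμ, vStep_close_run, fold_vStep_none] at hv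
      simp at hv
    | dead =>
      exfalso
      rw [validEnc, hfold, hq0, hpush, hsegf, hμ, vStep_close_dead, fold_vStep_none] at hv
      simp at hv

-- ---------- main induction: both programs agree, reduction by reduction ----------

theorem mainL : ∀ (N : Nat) (s : List Char), s.count ']' ≤ N → validEnc s = true →
    (match runA [[]] s with
     | none => ""
     | some res => String.ofList (res.head?.getD [])) =
    (match loopB (s.count ']') s with
     | none => ""
     | some t => String.ofList (t.takeWhile (· ≠ '['))) := by
  intro N
  induction N with
  | zero =>
    intro s hc hp
    have hm : ']' ∉ s := fun hmem => by
      have := List.count_pos_iff.2 hmem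
      omega
    exact base_case s hm _
  | succ N ih =>
    intro s hc hp
    by_cases hm : ']' ∈ s
    · obtain ⟨x, seg, y, D, c, r, rfl, hx, hs1, hs2, hseg, hDne, hD, hc1⟩ :=
        extract s hp hm
      have hmeme : ∀ a ∈ List.flatten (List.replicate (digitsVal D) (c :: r)), a ∈ seg := by
        intro a ha
        have := mem_flatten_replicate _ _ _ ha
        rw [hseg]
        rcases List.mem_cons.1 this with rfl | h
        · exact List.mem_append.2 (Or.inr List.mem_cons_self)
        · exact List.mem_append.2 (Or.inr (List.mem_cons_of_mem _ h))
      have he1 : '[' ∉ List.flatten (List.replicate (digitsVal D) (c :: r)) :=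
        fun h => hs1 (hmeme _ h)
      have he2 : ']' ∉ List.flatten (List.replicate (digitsVal D) (c :: r)) :=
        fun h => hs2 (hmeme _ h)
      have hdec : popDecode? seg = some (List.flatten (List.replicate (digitsVal D) (c :: r))) := by
        rw [hseg]
        exact popDecode_eq D c r hDne hD hc1
      have hred := runA_reduce x seg y (List.flatten (List.replicate (digitsVal D) (c :: r)))
        [[]] (by simp) hx hs1 hs2 he1 he2 hdec
      have hstep := stepB_eq x seg y D c r hx hs1 hs2 hseg hDne hD hc1
      have hz1 : seg.count ']' = 0 := List.count_eq_zero.2 hs2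
      have hz2 : (List.flatten (List.replicate (digitsVal D) (c :: r))).count ']' = 0 :=
        List.count_eq_zero.2 he2
      have hcnt : (x ++ '[' :: (seg ++ ']' :: y)).count ']' =
          (x ++ (List.flatten (List.replicate (digitsVal D) (c :: r)) ++ y)).count ']' + 1 := by
        simp [List.count_append, hz1, hz2]
        omega
      have hpre' : validEnc (x ++ (List.flatten (List.replicate (digitsVal D) (c :: r)) ++ y)) = true := by
        rw [← valid_reduct x seg y D c r hseg hDne hD hc1 hs1 hs2]
        exact hp
      have hBl : loopB ((x ++ '[' :: (seg ++ ']' :: y)).count ']') (x ++ '[' :: (seg ++ ']' :: y)) =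
          loopB ((x ++ (List.flatten (List.replicate (digitsVal D) (c :: r)) ++ y)).count ']')
            (x ++ (List.flatten (List.replicate (digitsVal D) (c :: r)) ++ y)) := by
        rw [hcnt]
        simp only [loopB, if_pos hm, hstep, Option.bind_some]
      rw [hred, hBl]
      exact ih _ (by omega) hpre'
    · exact base_case s hm _

-- ===== VERDICT (by name: the statement is the Claim_ definition above) =====
theorem space_message_spec : Claim_equal_space_message := by
  unfold Claim_equal_space_message
  intro txt _ hpre
  unfold Spec_space_message
  have := mainL (txt.toList.count ']') txt.toList (le_refl _) hpre
  simpa [space_message, space_message_alt] using this
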